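-- pv_equiv track=rewrite | github.com/mance-rah/AlgoShell | mvp/AlgoShell/solutions/drone_flight_planner.py | calc_drone_min_energy
-- ===== SOURCE A (Python) =====
-- def calc_drone_min_energy(route):
--   diff_list= []
--
--   for timestep in range(len(route)-1):
--     prev_waypoint = route[timestep]
--     curr_waypoint = route[timestep+1]
--     diff_list.append(get_alt(prev_waypoint)-get_alt(curr_waypoint))
--
--   min_value = float('inf')
--   fuel = 0
--   for diff in diff_list:
--     fuel += diff
--     min_value = min(fuel, min_value)
--
--   return max(-1*min_value, 0)
--
-- def get_alt(route):
--   '''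
--   Get altitude of given waypoint.
--   '''
--   return route[2]
-- ===== SOURCE B (Python) =====
-- def calc_drone_min_energy(route):
--   if len(route) < 2:
--     return 0
--   start = get_alt(route[0])
--   highest = max(get_alt(w) for w in route[1:])
--   return max(highest - start, 0)
--
-- def get_alt(route):
--   '''
--   Get altitude of given waypoint.
--   '''
--   return route[2]
-- ===== Notes on version B (the rewrite author's own statement) =====
-- stated objective: simpler
-- what changed: Replaces the adjacent-difference list plus prefix-sum/prefix-min loop by the telescoped closed form: the answer is max(highest altitude after the start minus the start altitude, 0), computed in one max scan.
import Mathlib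
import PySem

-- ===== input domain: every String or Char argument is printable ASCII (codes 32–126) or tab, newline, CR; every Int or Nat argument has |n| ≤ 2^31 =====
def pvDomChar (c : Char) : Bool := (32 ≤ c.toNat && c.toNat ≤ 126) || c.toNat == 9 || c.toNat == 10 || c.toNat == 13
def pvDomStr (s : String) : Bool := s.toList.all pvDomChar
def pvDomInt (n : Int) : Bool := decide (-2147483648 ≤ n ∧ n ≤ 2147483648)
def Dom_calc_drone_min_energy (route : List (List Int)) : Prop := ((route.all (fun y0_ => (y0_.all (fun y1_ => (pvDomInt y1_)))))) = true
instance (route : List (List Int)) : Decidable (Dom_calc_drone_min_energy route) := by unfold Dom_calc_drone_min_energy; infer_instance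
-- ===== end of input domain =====

-- B replaces A's adjacent-difference list + prefix-sum/prefix-min loop by the telescoped
-- closed form max(highest altitude after the start - start altitude, 0); objective: simpler.


-- ===== PORT A =====
-- get_alt(w) = w[2]; exact under Pre_ (waypoints have length ≥ 3 whenever indexed)
def pvGetAlt (w : List Int) : Int := (PySem.List.pyGet? w 2).getD 0

-- one step of A's second loop: fuel += diff; min_value = min(fuel, min_value)
-- (min_value starts as float('inf'), modelled as `none`; min(fuel, inf) = fuel)
def pvStepA (st : Option Int × Int) (d : Int) : Option Int × Int :=
  let fuel := st.2 + d
  (some (match st.1 with | none => fuel | some m => min fuel m), fuel)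

def calc_drone_min_energy (route : List (List Int)) : Int :=
  let diffList := (PySem.List.pyRange 0 ((route.length : Int) - 1) 1).map
    (fun t => pvGetAlt (PySem.List.pyGetD route t []) -
              pvGetAlt (PySem.List.pyGetD route (t + 1) []))
  let st := diffList.foldl pvStepA (none, 0)
  match st.1 with
  | none => 0                      -- max(-1*inf…, 0) with empty diff list = 0
  | some m => max (-1 * m) 0

-- ===== PORT B =====
def pvGetAltB (w : List Int) : Int := (PySem.List.pyGet? w 2).getD 0

def calc_drone_min_energy_alt (route : List (List Int)) : Int :=
  match route with
  | [] => 0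
  | [_] => 0
  | w0 :: w1 :: rest =>
    let start := pvGetAltB w0
    let highest := (rest.map pvGetAltB).foldl max (pvGetAltB w1)
    max (highest - start) 0

-- ===== PRECONDITION & SPEC =====
-- Pre_ excludes exactly the inputs where get_alt raises IndexError (in both A and B):
-- a route with at least two waypoints, one of which has fewer than 3 coordinates.
def Pre_calc_drone_min_energy (route : List (List Int)) : Prop :=
  route.length < 2 ∨ ∀ w ∈ route, 3 ≤ w.length
instance (route : List (List Int)) : Decidable (Pre_calc_drone_min_energy route) := by
  unfold Pre_calc_drone_min_energy; infer_instance

def pvWitness_calc_drone_min_energy : List (List Int) := [[0, 0, 5], [0, 0, 3], [0, 0, 9]]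

def Spec_calc_drone_min_energy (route : List (List Int)) (out : Int) : Prop :=
  out = calc_drone_min_energy_alt route
instance (route : List (List Int)) (out : Int) : Decidable (Spec_calc_drone_min_energy route out) := by
  unfold Spec_calc_drone_min_energy; infer_instance

-- ===== CLAIM (what is proved, stated in full; the proofs are below) =====
def Claim_equal_calc_drone_min_energy : Prop := ∀ (route : List (List Int)), Dom_calc_drone_min_energy route → Pre_calc_drone_min_energy route → Spec_calc_drone_min_energy route (calc_drone_min_energy route)

-- ===== LEMMAS AND PROOFS =====

-- A's diff list, written structurally over the altitude list
def pvAdjDiffs : List Int → List Int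
  | a :: b :: t => (a - b) :: pvAdjDiffs (b :: t)
  | _ => []

theorem pvAdjDiffs_length (l : List Int) : (pvAdjDiffs l).length = l.length - 1 := by
  match l with
  | [] => rfl
  | [_] => rfl
  | a :: b :: t => simp [pvAdjDiffs, pvAdjDiffs_length (b :: t)]

theorem pvAdjDiffs_getElem (l : List Int) (i : Nat) (h : i < (pvAdjDiffs l).length)
    (h1 : i < l.length) (h2 : i + 1 < l.length) :
    (pvAdjDiffs l)[i] = l[i] - l[i + 1] := by
  match l, i with
  | a :: b :: t, 0 => rfl
  | a :: b :: t, (j+1) =>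
    have := pvAdjDiffs_getElem (b :: t) j (by simpa [pvAdjDiffs_length] using h)
      (by simp at h2 ⊢; omega) (by simp at h2 ⊢; omega)
    simpa [pvAdjDiffs] using this

-- A's index-based diff list is the structural adjacent-difference list of the altitudes
theorem pv_diffList_eq (route : List (List Int)) :
    (PySem.List.pyRange 0 ((route.length : Int) - 1) 1).map
      (fun t => pvGetAlt (PySem.List.pyGetD route t []) -
                pvGetAlt (PySem.List.pyGetD route (t + 1) [])) =
    pvAdjDiffs (route.map pvGetAlt) := by
  apply List.ext_getElem
  · simp [PySem.List.length_pyRange_one, pvAdjDiffs_length]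
  · intro i h1 h2
    have hi : i + 1 < route.length := by
      simp [PySem.List.length_pyRange_one] at h1; omega
    rw [List.getElem_map, PySem.List.getElem_pyRange_one]
    simp only [zero_add]
    rw [show ((i : Int) + 1) = ((i + 1 : Nat) : Int) by push_cast; ring]
    rw [PySem.List.pyGetD_ofNat route i [] (by omega),
        PySem.List.pyGetD_ofNat route (i+1) [] hi]
    rw [pvAdjDiffs_getElem _ i h2 (by simp; omega) (by simp; omega)]
    simp

-- invariant of A's prefix-sum / prefix-min loop over the structural diff list:
-- starting from fuel = X - prev and min-so-far = X - M, the final min is X - max over (M :: t)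
theorem pv_loop_char (t : List Int) : ∀ (prev X M : Int),
    ((pvAdjDiffs (prev :: t)).foldl pvStepA (some (X - M), X - prev)).1 =
    some (X - t.foldl max M) := by
  induction t with
  | nil => intro prev X M; simp [pvAdjDiffs]
  | cons a t' ih =>
    intro prev X M
    show ((pvAdjDiffs (a :: t')).foldl pvStepA
      (pvStepA (some (X - M), X - prev) (prev - a))).1 = _
    have hstep : pvStepA (some (X - M), X - prev) (prev - a) =
        (some (X - max M a), X - a) := by
      simp [pvStepA]; omega
    rw [hstep, ih a X (max M a)]
    simp

-- ===== VERDICT (by name: the statement is the Claim_ definition above) =====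
theorem calc_drone_min_energy_spec : Claim_equal_calc_drone_min_energy := by
  intro route _hdom _hpre
  unfold Spec_calc_drone_min_energy
  match route with
  | [] => rfl
  | [_] => rfl
  | w0 :: w1 :: rest =>
    unfold calc_drone_min_energy calc_drone_min_energy_alt
    rw [pv_diffList_eq]
    simp only [List.map_cons]
    show (match ((pvAdjDiffs (pvGetAlt w1 :: rest.map pvGetAlt)).foldl pvStepA
        (pvStepA (none, 0) (pvGetAlt w0 - pvGetAlt w1))).1 with
      | none => (0 : Int) | some m => max (-1 * m) 0) = _
    have hstep : pvStepA ((none : Option Int), 0) (pvGetAlt w0 - pvGetAlt w1) =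
        (some (pvGetAlt w0 - pvGetAlt w1), pvGetAlt w0 - pvGetAlt w1) := by
      simp [pvStepA]
    rw [hstep, pv_loop_char (rest.map pvGetAlt) (pvGetAlt w1) (pvGetAlt w0) (pvGetAlt w1)]
    have hB : pvGetAltB = pvGetAlt := rfl
    simp only [hB]
    rw [neg_one_mul, neg_sub]
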